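-- pv_equiv track=rewrite | github.com/hudsonshank/AOAI-RAG | azure-function/enhanced_excel_processor.py | _find_table_end_col
-- ===== SOURCE A (Python) =====
-- from typing import Dict, Any, List, Optional, Tuple
--
-- def _find_table_end_col(cell_grid: List[List[str]], start_row: int, start_col: int) -> int:
--     """Find where the table ends horizontally"""
--     if start_row >= len(cell_grid):
--         return start_col
--
--     row = cell_grid[start_row]
--     end_col = start_col
--
--     for col_idx in range(start_col, len(row)):
--         if row[col_idx].strip():
--             end_col = col_idx
--
--     return end_col
-- ===== SOURCE B (Python) =====
-- def _find_table_end_col(cell_grid, start_row, start_col):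
--     """Find where the table ends horizontally"""
--     if start_row >= len(cell_grid):
--         return start_col
--     row = cell_grid[start_row]
--     # trim trailing empty cells, then compare the last kept index with start_col
--     trimmed = len(row)
--     while trimmed > 0 and not row[trimmed - 1].strip():
--         trimmed -= 1
--     if trimmed == 0 or trimmed - 1 < start_col:
--         return start_col
--     return trimmed - 1
-- ===== Notes on version B (the rewrite author's own statement) =====
-- stated objective: alternative
-- what changed: Replaces A's forward scan from start_col that keeps overwriting a 'last non-empty seen' accumulator with a trailing-trim: shrink the row length past trailing blank cells once, then compare the last kept index with start_col.
import Mathlib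
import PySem

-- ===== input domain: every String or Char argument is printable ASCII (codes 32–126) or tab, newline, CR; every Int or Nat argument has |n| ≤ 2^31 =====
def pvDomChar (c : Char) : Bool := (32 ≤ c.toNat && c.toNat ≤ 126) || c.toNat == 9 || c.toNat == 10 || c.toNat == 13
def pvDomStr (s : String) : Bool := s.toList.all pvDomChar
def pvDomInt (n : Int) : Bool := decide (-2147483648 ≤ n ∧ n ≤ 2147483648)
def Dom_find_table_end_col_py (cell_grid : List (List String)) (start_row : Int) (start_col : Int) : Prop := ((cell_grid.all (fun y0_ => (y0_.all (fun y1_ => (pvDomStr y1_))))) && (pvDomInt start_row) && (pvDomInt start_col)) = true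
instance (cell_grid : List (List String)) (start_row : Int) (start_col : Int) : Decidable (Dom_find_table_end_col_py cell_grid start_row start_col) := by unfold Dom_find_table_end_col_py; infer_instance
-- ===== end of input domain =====

-- B replaces A's forward 'last non-empty seen' accumulator scan from start_col by a one-shot
-- trailing-trim of the row followed by a comparison with start_col; same return value under Pre_.

-- ===== PORT A =====
-- forward loop: end_col starts at start_col and is overwritten by each non-empty column index
def find_table_end_col_py (cell_grid : List (List String)) (start_row : Int) (start_col : Int) : Int :=
  if (cell_grid.length : Int) ≤ start_row then start_col
  else
    let row := (PySem.List.pyGet? cell_grid start_row).getD []  -- getD exact under Pre_ (index in range)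
    (PySem.List.pyRange start_col (row.length : Int) 1).foldl
      (fun acc i => if PySem.Str.strip (PySem.List.pyGetD row i "") != "" then i else acc)
      start_col

-- ===== PORT B =====
-- the while loop of Source B: drop trailing cells whose strip() is empty (recursion on the reversed row)
def pvTrimRev : List String → List String
  | [] => []
  | c :: rest => if PySem.Str.strip c == "" then pvTrimRev rest else c :: rest

def find_table_end_col_py_alt (cell_grid : List (List String)) (start_row : Int) (start_col : Int) : Int :=
  if (cell_grid.length : Int) ≤ start_row then start_col
  else
    let row := (PySem.List.pyGet? cell_grid start_row).getD []  -- getD exact under Pre_ (index in range)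
    let trimmed : Int := ((pvTrimRev row.reverse).length : Int)
    if trimmed = 0 ∨ trimmed - 1 < start_col then start_col else trimmed - 1

-- ===== PRECONDITION & SPEC =====
-- Pre_ excludes exactly the inputs where Python A raises IndexError: a negative start_row below
-- -len(cell_grid) while the row branch is taken, or a start_col below -len(row).
def Pre_find_table_end_col_py (cell_grid : List (List String)) (start_row : Int) (start_col : Int) : Prop :=
  (cell_grid.length : Int) ≤ start_row ∨
    (-(cell_grid.length : Int) ≤ start_row ∧
      -((((PySem.List.pyGet? cell_grid start_row).getD []).length : Int)) ≤ start_col)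
instance (cell_grid : List (List String)) (start_row : Int) (start_col : Int) : Decidable (Pre_find_table_end_col_py cell_grid start_row start_col) := by unfold Pre_find_table_end_col_py; infer_instance

def pvWitness_find_table_end_col_py : List (List String) × Int × Int := ([["a", "", " b "]], 0, 0)

def Spec_find_table_end_col_py (cell_grid : List (List String)) (start_row : Int) (start_col : Int) (out : Int) : Prop := out = find_table_end_col_py_alt cell_grid start_row start_col
instance (cell_grid : List (List String)) (start_row : Int) (start_col : Int) (out : Int) : Decidable (Spec_find_table_end_col_py cell_grid start_row start_col out) := by unfold Spec_find_table_end_col_py; infer_instance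

-- ===== CLAIM (what is proved, stated in full; the proofs are below) =====
def Claim_equal_find_table_end_col_py : Prop := ∀ (cell_grid : List (List String)) (start_row : Int) (start_col : Int), Dom_find_table_end_col_py cell_grid start_row start_col → Pre_find_table_end_col_py cell_grid start_row start_col → Spec_find_table_end_col_py cell_grid start_row start_col (find_table_end_col_py cell_grid start_row start_col)

-- ===== LEMMAS AND PROOFS =====

theorem pvTrimRev_length_le (l : List String) : (pvTrimRev l).length ≤ l.length := by
  induction l with
  | nil => simp [pvTrimRev]
  | cons c rest ih =>
    simp only [pvTrimRev]
    split
    · exact Nat.le_succ_of_le ih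
    · simp

theorem pvTrimRev_eq_nil_all_empty (l : List String) (h : pvTrimRev l = []) :
    ∀ s ∈ l, PySem.Str.strip s = "" := by
  induction l with
  | nil => simp
  | cons c rest ih =>
    simp only [pvTrimRev] at h
    by_cases hc : PySem.Str.strip c = ""
    · rw [if_pos (by simpa using hc)] at h
      intro s hs
      rcases List.mem_cons.mp hs with heq | hs
      · rw [heq]; exact hc
      · exact ih h s hs
    · rw [if_neg (by simpa using hc)] at h
      exact absurd h (by simp)

-- no non-empty cell is seen: the accumulator survives the whole fold
theorem pv_foldl_no_hit (row : List String) (L : List Int) (acc : Int)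
    (h : ∀ i ∈ L, PySem.Str.strip (PySem.List.pyGetD row i "") = "") :
    L.foldl (fun acc i => if PySem.Str.strip (PySem.List.pyGetD row i "") != "" then i else acc) acc
      = acc := by
  induction L generalizing acc with
  | nil => rfl
  | cons x xs ih =>
    simp only [List.foldl_cons]
    rw [if_neg (by simp [h x (by simp)])]
    exact ih acc (fun i hi => h i (by simp [hi]))

-- the forward last-match fold over range(a, len(row)) (0 ≤ a) in terms of the trimmed length
theorem pv_foldl_eq_trim (row : List String) (a : Int) (ha : 0 ≤ a) (acc : Int) :
    (PySem.List.pyRange a (row.length : Int) 1).foldl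
      (fun acc i => if PySem.Str.strip (PySem.List.pyGetD row i "") != "" then i else acc) acc
    = (if a + 1 ≤ ((pvTrimRev row.reverse).length : Int)
        then ((pvTrimRev row.reverse).length : Int) - 1 else acc) := by
  induction row using List.reverseRecOn generalizing acc with
  | nil =>
    rw [PySem.List.pyRange_one_eq_nil (by simpa using ha)]
    simp only [List.foldl_nil, pvTrimRev, List.reverse_nil, List.length_nil, Nat.cast_zero]
    rw [if_neg (by omega)]
  | append_singleton xs c ih =>
    have hlen : ((xs ++ [c]).length : Int) = (xs.length : Int) + 1 := by simp
    by_cases hle : a ≤ (xs.length : Int)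
    · rw [hlen, PySem.List.pyRange_one_succ_right hle, List.foldl_append]
      have hinner :
          (PySem.List.pyRange a (xs.length : Int) 1).foldl
            (fun acc i => if PySem.Str.strip (PySem.List.pyGetD (xs ++ [c]) i "") != "" then i else acc) acc
          = (PySem.List.pyRange a (xs.length : Int) 1).foldl
            (fun acc i => if PySem.Str.strip (PySem.List.pyGetD xs i "") != "" then i else acc) acc := by
        apply PySem.List.foldl_congr_mem
        intro acc2 i hi
        have hi' := (PySem.List.mem_pyRange_one).1 hi
        have h0 : 0 ≤ i := le_trans ha hi'.1
        have h1 : i < (xs.length : Int) := hi'.2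
        rw [PySem.List.pyGetD_eq_getElem (xs ++ [c]) "" h0 (by rw [hlen]; omega),
            PySem.List.pyGetD_eq_getElem xs "" h0 h1,
            List.getElem_append_left (by omega)]
      have hc : PySem.List.pyGetD (xs ++ [c]) (xs.length : Int) "" = c := by
        rw [PySem.List.pyGetD_eq_getElem (xs ++ [c]) "" (by positivity) (by rw [hlen]; omega)]
        simp
      simp only [List.foldl_cons, List.foldl_nil, hinner, ih acc, hc]
      by_cases hcs : PySem.Str.strip c = ""
      · have htrim : pvTrimRev (c :: xs.reverse) = pvTrimRev xs.reverse := by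
          simp [pvTrimRev, hcs]
        simp [htrim, hcs]
      · have htrim : pvTrimRev (c :: xs.reverse) = c :: xs.reverse := by
          simp [pvTrimRev, hcs]
        have hb : (PySem.Str.strip c != "") = true := by simp [hcs]
        simp only [List.reverse_append, List.reverse_singleton, List.singleton_append, htrim]
        rw [hb, if_pos rfl]
        simp only [List.length_cons, List.length_reverse]
        rw [if_pos (by push_cast; omega)]
        push_cast
        omega
    · rw [hlen, PySem.List.pyRange_one_eq_nil (by omega), List.foldl_nil]
      have := pvTrimRev_length_le (xs ++ [c]).reverse
      rw [if_neg (by simp at this ⊢; omega)]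

theorem find_table_end_col_py_eq (cell_grid : List (List String)) (start_row start_col : Int)
    (hpre : Pre_find_table_end_col_py cell_grid start_row start_col) :
    find_table_end_col_py cell_grid start_row start_col
      = find_table_end_col_py_alt cell_grid start_row start_col := by
  unfold find_table_end_col_py find_table_end_col_py_alt
  split
  · rfl
  · rename_i hrow
    dsimp only
    set row := (PySem.List.pyGet? cell_grid start_row).getD [] with hrowdef
    set t : Int := ((pvTrimRev row.reverse).length : Int) with ht
    have hsc : -(row.length : Int) ≤ start_col := by
      rcases hpre with h | ⟨_, h⟩
      · exact absurd h hrow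
      · exact h
    have htle : t ≤ (row.length : Int) := by
      have := pvTrimRev_length_le row.reverse
      simp only [ht]; simp at this ⊢; omega
    have ht0 : 0 ≤ t := by positivity
    by_cases hnn : 0 ≤ start_col
    · rw [pv_foldl_eq_trim row start_col hnn start_col, ← ht]
      split_ifs <;> omega
    · -- negative start_col: split the range at 0
      rw [PySem.List.pyRange_one_append start_col 0 (row.length : Int) (by omega) (by positivity),
          List.foldl_append, pv_foldl_eq_trim row 0 le_rfl, ← ht]
      by_cases htz : t = 0
      · -- every cell of the row is blank, including the wrapped negative indices
        have hall : ∀ s ∈ row, PySem.Str.strip s = "" := by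
          intro s hs
          exact pvTrimRev_eq_nil_all_empty row.reverse
            (List.length_eq_zero_iff.mp (by omega)) s (List.mem_reverse.mpr hs)
        have hacc : (PySem.List.pyRange start_col 0 1).foldl
            (fun acc i => if PySem.Str.strip (PySem.List.pyGetD row i "") != "" then i else acc) start_col
              = start_col := by
          apply pv_foldl_no_hit
          intro i hi
          have hi' := (PySem.List.mem_pyRange_one).1 hi
          exact hall _ (PySem.List.pyGetD_mem row ""
            (by constructor <;> omega))
        rw [hacc, if_neg (by omega), if_pos (by omega)]
      · rw [if_pos (by omega), if_neg (by omega)]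

theorem find_table_end_col_py_spec : Claim_equal_find_table_end_col_py := by
  intro g sr sc _ hpre
  unfold Spec_find_table_end_col_py
  exact find_table_end_col_py_eq g sr sc hpre
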